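-- pv_equiv track=rewrite | github.com/wyf162/pythonProject | codeforces/greedy/1800/1841C.py | computer
-- ===== SOURCE A (Python) =====
-- def computer(nums):
--     n = len(nums)
--     val = 0
--     mx = 0
--     for i in range(n - 1, -1, -1):
--         if nums[i] < mx:
--             val -= nums[i]
--         else:
--             val += nums[i]
--             mx = max(mx, nums[i])
--     return val
-- ===== SOURCE B (Python) =====
-- def computer(nums):
--     n = len(nums)
--     sm = [0] * n  # sm[i] = max(0, nums[i+1], ..., nums[n-1])
--     for i in range(n - 2, -1, -1):
--         sm[i] = max(sm[i + 1], nums[i + 1])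
--     return sum(x if x >= s else -x for x, s in zip(nums, sm))
-- ===== Notes on version B (the rewrite author's own statement) =====
-- stated objective: alternative
-- what changed: Replaces the fused backward scan with mutable (val, mx) state by a precomputed suffix-maximum table built in one backward pass plus a separate zip/sum comprehension pass.
import Mathlib
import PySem

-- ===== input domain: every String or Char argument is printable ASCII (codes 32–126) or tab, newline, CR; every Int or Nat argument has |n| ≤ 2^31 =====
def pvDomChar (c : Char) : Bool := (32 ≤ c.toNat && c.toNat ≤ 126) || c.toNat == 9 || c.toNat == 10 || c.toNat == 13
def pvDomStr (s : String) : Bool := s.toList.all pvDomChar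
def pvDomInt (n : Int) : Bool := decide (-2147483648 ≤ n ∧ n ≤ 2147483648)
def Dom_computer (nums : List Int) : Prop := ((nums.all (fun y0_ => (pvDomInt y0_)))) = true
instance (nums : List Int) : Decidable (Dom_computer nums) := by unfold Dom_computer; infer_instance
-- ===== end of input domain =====

-- B replaces A's fused backward scan (running val/mx state) by a suffix-maximum table
-- built in one backward pass plus a separate zip/sum pass (objective: alternative).


-- ===== PORT A =====
-- A's loop runs i = n-1 .. 0, i.e. over the elements of nums from the right;
-- ported as a foldl over nums.reverse carrying the same state (val, mx).
def computer (nums : List Int) : Int :=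
  (nums.reverse.foldl
    (fun (s : Int × Int) x =>
      if x < s.2 then (s.1 - x, s.2) else (s.1 + x, max s.2 x))
    (0, 0)).1

-- ===== PORT B =====
-- Suffix-max table: smTable xs = (sm, m) with sm the per-position floored suffix
-- maxima (sm[i] = max(0, xs[i+1..])) and m = max(0, xs[0..]), built back-to-front.
def smTable : List Int → List Int × Int
  | [] => ([], 0)
  | x :: xs =>
    let p := smTable xs
    (p.2 :: p.1, max p.2 x)

def computer_alt (nums : List Int) : Int :=
  (((nums.zip (smTable nums).1).map (fun p => if p.1 ≥ p.2 then p.1 else -p.1))).sum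

-- ===== PRECONDITION & SPEC =====
def Spec_computer (nums : List Int) (out : Int) : Prop := out = computer_alt nums
instance (nums : List Int) (out : Int) : Decidable (Spec_computer nums out) := by unfold Spec_computer; infer_instance

-- ===== CLAIM (what is proved, stated in full; the proofs are below) =====
def Claim_equal_computer : Prop := ∀ (nums : List Int), Dom_computer nums → Spec_computer nums (computer nums)

-- ===== LEMMAS AND PROOFS =====
lemma computer_loop_inv (xs : List Int) :
    xs.reverse.foldl
      (fun (s : Int × Int) x =>
        if x < s.2 then (s.1 - x, s.2) else (s.1 + x, max s.2 x))
      (0, 0) = (computer_alt xs, (smTable xs).2) := by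
  induction xs with
  | nil => simp [computer_alt, smTable]
  | cons x l ih =>
    simp only [List.reverse_cons, List.foldl_append, ih, List.foldl_cons, List.foldl_nil]
    simp only [computer_alt, smTable, List.zip_cons_cons, List.map_cons, List.sum_cons]
    by_cases h : x < (smTable l).2
    · simp only [if_pos h, if_neg (not_le.mpr h), Prod.mk.injEq]
      exact ⟨by ring, (max_eq_left (le_of_lt h)).symm⟩
    · simp only [if_neg h, if_pos (not_lt.mp h), Prod.mk.injEq]
      exact ⟨by ring, trivial⟩

-- ===== VERDICT (by name: the statement is the Claim_ definition above) =====
theorem computer_spec : Claim_equal_computer := by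
  intro nums _
  unfold Spec_computer computer
  rw [computer_loop_inv]
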